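-- pv_equiv track=rewrite | github.com/AdamSimkinbgu/Intro-to-CS-Python-Assignments | Assignment5-RecursionWithMemoization/Assignment5.py | rosh_zanav_rec
-- ===== SOURCE A (Python) =====
-- def rosh_zanav_rec(word, memory, lihiscore, naftulscore, step_counter):
--     """
--     This method is the driving side of the algorithm, checking all possible outcomes of the players choices and returns
--     a bool statement whether the word is safe for player 2 (Naftul).
--     :param word [str] - A given word.
--     :param memory [dict] - A dictionary to keep score to be given.
--     :param lihiscore [int] - Value to keep Lihi's score.
--     :param naftulscore [int] - Value to keep Naftul's score.
--     :param step_counter [int] - Value to keep count of turns.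
--     :return [bool] A bool statement whether a word is safe and Naftul is going to win no matter what.
--     """
--     if len(word) == 0:
--         if naftulscore > lihiscore:
--             return True
--         return False
--
--     if word[0] == word[len(word) - 1] and len(word) == 4:
--         if step_counter % 2 == 0:
--             return False
--
--     if step_counter % 2 == 0:
--         if word[0] >= word[len(word) - 1]:
--             return rosh_zanav_rec(word[1:], memory, lihiscore, naftulscore + memory.get(str(word[0]), 0), step_counter + 1)
--         return rosh_zanav_rec(word[:len(word) - 1], memory, lihiscore, naftulscore + memory.get(str(word[len(word) - 1]), 0), step_counter + 1)
--
--     if word[0] > word[len(word) - 1]: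
--         return rosh_zanav_rec(word[1:], memory, lihiscore + memory.get(str(word[0]), 0), naftulscore, step_counter + 1)
--     return rosh_zanav_rec(word[:len(word) - 1], memory, lihiscore + memory.get(str(word[len(word) - 1]), 0), naftulscore,step_counter + 1)
-- ===== SOURCE B (Python) =====
-- def rosh_zanav_rec(word, memory, lihiscore, naftulscore, step_counter):
--     # Iterative two-pointer walk over indices; no string slicing, no recursion.
--     i, j = 0, len(word) - 1
--     while i <= j:
--         a, b = word[i], word[j]
--         even = step_counter % 2 == 0
--         if a == b and j - i == 3 and even:
--             return False
--         take_left = (a >= b) if even else (a > b)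
--         gain = memory.get(a if take_left else b, 0)
--         if even:
--             naftulscore += gain
--         else:
--             lihiscore += gain
--         if take_left:
--             i += 1
--         else:
--             j -= 1
--         step_counter += 1
--     return naftulscore > lihiscore
-- ===== Notes on version B (the rewrite author's own statement) =====
-- stated objective: faster
-- what changed: Replaced the recursive definition that allocates a fresh string slice (word[1:] / word[:-1]) at every step by an iterative two-pointer index walk over the original string with accumulator variables.
import Mathlib
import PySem

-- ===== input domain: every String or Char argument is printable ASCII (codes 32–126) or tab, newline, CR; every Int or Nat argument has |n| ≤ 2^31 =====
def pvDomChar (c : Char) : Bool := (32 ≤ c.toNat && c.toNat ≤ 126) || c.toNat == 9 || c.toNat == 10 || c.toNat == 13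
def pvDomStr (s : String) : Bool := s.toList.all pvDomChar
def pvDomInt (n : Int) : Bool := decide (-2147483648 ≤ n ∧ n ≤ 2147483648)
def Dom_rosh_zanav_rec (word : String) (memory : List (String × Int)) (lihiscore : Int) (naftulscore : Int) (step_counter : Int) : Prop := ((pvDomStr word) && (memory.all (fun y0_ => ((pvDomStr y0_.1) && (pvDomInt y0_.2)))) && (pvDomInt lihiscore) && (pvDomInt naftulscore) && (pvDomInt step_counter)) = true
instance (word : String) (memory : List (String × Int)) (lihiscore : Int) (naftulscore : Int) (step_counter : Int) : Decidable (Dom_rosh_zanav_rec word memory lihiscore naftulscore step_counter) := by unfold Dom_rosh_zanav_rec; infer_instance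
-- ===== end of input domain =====

-- B replaces A's recursion with fresh string slices at every step by an iterative
-- two-pointer index walk over the original string (objective: faster, O(n) vs O(n^2)).

-- ===== PORT A =====
-- A's recursion, on the word's character list (Python str = list of code points);
-- word[1:] = tail, word[:len-1] = dropLast, word[0] ≥/> word[-1] = code-point order.
def roshA (w : List Char) (mem : PySem.Dict String Int) (lihi : Int) (naftul : Int) (sc : Int) : Bool :=
  if h : w.length = 0 then decide (naftul > lihi)
  else
    let c := w.headD 'a'
    let d := w.getLastD 'a'
    if c = d ∧ w.length = 4 ∧ PySem.Int.mod sc 2 = 0 then false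
    else if PySem.Int.mod sc 2 = 0 then
      if d ≤ c then roshA w.tail mem lihi (naftul + mem.getD (String.ofList [c]) 0) (sc + 1)
      else roshA w.dropLast mem lihi (naftul + mem.getD (String.ofList [d]) 0) (sc + 1)
    else
      if d < c then roshA w.tail mem (lihi + mem.getD (String.ofList [c]) 0) naftul (sc + 1)
      else roshA w.dropLast mem (lihi + mem.getD (String.ofList [d]) 0) naftul (sc + 1)
termination_by w.length
decreasing_by
  · simp [List.length_tail]; omega
  · simp [List.length_dropLast]; omega
  · simp [List.length_tail]; omega
  · simp [List.length_dropLast]; omega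

def rosh_zanav_rec (word : String) (memory : List (String × Int)) (lihiscore : Int) (naftulscore : Int) (step_counter : Int) : Bool :=
  roshA word.toList (PySem.Dict.ofList memory) lihiscore naftulscore step_counter

-- ===== PORT B =====
-- B's while-loop as recursion on the two pointers; the indices i, j are always in
-- range when the loop body runs, so pyGetD's default is never used.
def goB (w : List Char) (mem : PySem.Dict String Int) (i j : Int) (lihi : Int) (naftul : Int) (sc : Int) : Bool :=
  if h : i ≤ j then
    let a := PySem.List.pyGetD w i 'a'
    let b := PySem.List.pyGetD w j 'a'
    let even := PySem.Int.mod sc 2 = 0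
    if a = b ∧ j - i = 3 ∧ even then false
    else
      let takeLeft := if even then b ≤ a else b < a
      let gain := mem.getD (String.ofList [if takeLeft then a else b]) 0
      let lihi' := if even then lihi else lihi + gain
      let naftul' := if even then naftul + gain else naftul
      if takeLeft then goB w mem (i + 1) j lihi' naftul' (sc + 1)
      else goB w mem i (j - 1) lihi' naftul' (sc + 1)
  else decide (naftul > lihi)
termination_by (j + 1 - i).toNat
decreasing_by all_goals omega

def rosh_zanav_rec_alt (word : String) (memory : List (String × Int)) (lihiscore : Int) (naftulscore : Int) (step_counter : Int) : Bool :=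
  let w := word.toList
  goB w (PySem.Dict.ofList memory) 0 ((w.length : Int) - 1) lihiscore naftulscore step_counter

-- ===== PRECONDITION & SPEC =====
def Spec_rosh_zanav_rec (word : String) (memory : List (String × Int)) (lihiscore : Int) (naftulscore : Int) (step_counter : Int) (out : Bool) : Prop := out = rosh_zanav_rec_alt word memory lihiscore naftulscore step_counter
instance (word : String) (memory : List (String × Int)) (lihiscore : Int) (naftulscore : Int) (step_counter : Int) (out : Bool) : Decidable (Spec_rosh_zanav_rec word memory lihiscore naftulscore step_counter out) := by unfold Spec_rosh_zanav_rec; infer_instance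

-- ===== CLAIM (what is proved, stated in full; the proofs are below) =====
def Claim_equal_rosh_zanav_rec : Prop := ∀ (word : String) (memory : List (String × Int)) (lihiscore : Int) (naftulscore : Int) (step_counter : Int), Dom_rosh_zanav_rec word memory lihiscore naftulscore step_counter → Spec_rosh_zanav_rec word memory lihiscore naftulscore step_counter (rosh_zanav_rec word memory lihiscore naftulscore step_counter)

-- ===== LEMMAS AND PROOFS =====

-- The loop invariant: goB on window [i, j] computes roshA on the corresponding sublist.
lemma goB_eq_roshA (mem : PySem.Dict String Int) :
    ∀ (k : Nat) (w : List Char) (i j lihi naftul sc : Int),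
      0 ≤ i → i ≤ j + 1 → j < (w.length : Int) → (j + 1 - i).toNat = k →
      roshA ((w.drop i.toNat).take k) mem lihi naftul sc = goB w mem i j lihi naftul sc := by
  intro k
  induction k with
  | zero =>
    intro w i j lihi naftul sc h0 h1 h2 hk
    rw [goB, roshA]
    simp [show ¬ i ≤ j by omega]
  | succ k ih =>
    intro w i j lihi naftul sc h0 h1 h2 hk
    have hij : i ≤ j := by omega
    have hilt : i.toNat < w.length := by omega
    have hjn : j.toNat = i.toNat + k := by omega
    have hwin : i.toNat + (k + 1) ≤ w.length := by omega
    have hdrop : w.drop i.toNat = w[i.toNat] :: w.drop (i.toNat + 1) :=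
      List.drop_eq_getElem_cons hilt
    have hsub : (w.drop i.toNat).take (k + 1) = w[i.toNat] :: (w.drop (i.toNat + 1)).take k := by
      rw [hdrop, List.take_succ_cons]
    have hlen : ((w.drop i.toNat).take (k + 1)).length = k + 1 := by
      simp [List.length_take, List.length_drop]; omega
    have hlast : ((w.drop i.toNat).take (k + 1)).getLastD 'a' = w[i.toNat + k]'(by omega) := by
      rw [List.getLastD_eq_getLast?, List.getLast?_eq_getElem?, hlen]
      simp only [Nat.add_sub_cancel]
      rw [List.getElem?_take_of_lt (by omega), List.getElem?_drop]
      rw [List.getElem?_eq_getElem (by omega)]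
      rfl
    have hhead : ((w.drop i.toNat).take (k + 1)).headD 'a' = w[i.toNat] := by
      rw [hsub]; rfl
    have htail : ((w.drop i.toNat).take (k + 1)).tail = (w.drop (i + 1).toNat).take k := by
      rw [hsub]; simp [show (i+1).toNat = i.toNat + 1 by omega]
    have hdl : ((w.drop i.toNat).take (k + 1)).dropLast = (w.drop i.toNat).take k := by
      rw [List.dropLast_eq_take, hlen, List.take_take]
      congr 1
      omega
    have ha : PySem.List.pyGetD w i 'a' = w[i.toNat] :=
      PySem.List.pyGetD_eq_getElem w 'a' h0 (by omega)
    have hb : PySem.List.pyGetD w j 'a' = w[i.toNat + k]'(by omega) := by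
      rw [PySem.List.pyGetD_eq_getElem w 'a' (by omega) (by omega)]
      simp [hjn]
    rw [goB, roshA]
    simp only [ha, hb, hhead, hlast, hlen, dif_pos hij]
    rw [dif_neg (by omega : ¬ (k + 1 = 0))]
    have h34 : ((k + 1 = 4) = (j - i = 3)) := by
      apply propext; omega
    simp only [h34]
    by_cases hc : w[i.toNat]'(by omega) = w[i.toNat + k]'(by omega) ∧ j - i = 3 ∧ PySem.Int.mod sc 2 = 0
    · simp only [if_pos hc]
    · simp only [if_neg hc]
      by_cases he : PySem.Int.mod sc 2 = 0
      · simp only [if_pos he]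
        by_cases hle : w[i.toNat + k]'(by omega) ≤ w[i.toNat]'(by omega)
        · simp only [if_pos hle]
          rw [htail]
          exact ih w (i + 1) j _ _ _ (by omega) (by omega) h2 (by omega)
        · simp only [if_neg hle]
          rw [hdl]
          exact ih w i (j - 1) _ _ _ (by omega) (by omega) (by omega) (by omega)
      · simp only [if_neg he]
        by_cases hlt : w[i.toNat + k]'(by omega) < w[i.toNat]'(by omega)
        · simp only [if_pos hlt]
          rw [htail]
          exact ih w (i + 1) j _ _ _ (by omega) (by omega) h2 (by omega)
        · simp only [if_neg hlt]
          rw [hdl]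
          exact ih w i (j - 1) _ _ _ (by omega) (by omega) (by omega) (by omega)

theorem rosh_zanav_rec_spec : Claim_equal_rosh_zanav_rec := by
  intro word memory lihiscore naftulscore step_counter _
  unfold Spec_rosh_zanav_rec rosh_zanav_rec rosh_zanav_rec_alt
  have h := goB_eq_roshA (PySem.Dict.ofList memory) word.toList.length word.toList 0
    ((word.toList.length : Int) - 1) lihiscore naftulscore step_counter
    (by omega) (by omega) (by omega) (by omega)
  rw [show (0 : Int).toNat = 0 from rfl, List.drop_zero, List.take_length] at h
  exact h
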